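-- pv_equiv track=rewrite | github.com/Hermit888/CSCI570_Sequence-Alignment-Problem | DP approach/efficient.py | last_row_costs
-- ===== SOURCE A (Python) =====
-- from typing import Dict, List, Tuple
--
-- GAP_PENALTY = 30
--
-- MISMATCH_COST: Dict[str, Dict[str, int]] = {
--     "A": {"A": 0, "C": 110, "G": 48, "T": 94},
--     "C": {"A": 110, "C": 0, "G": 118, "T": 48},
--     "G": {"A": 48, "C": 118, "G": 0, "T": 110},
--     "T": {"A": 94, "C": 48, "G": 110, "T": 0}
-- }
--
-- def substitution_cost(left: str, right: str) -> int:
--     return MISMATCH_COST[left][right]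
--
-- def last_row_costs(x: str, y: str) -> List[int]:
--     """Returns DP costs for aligning x with every prefix of y using O(len(y)) space."""
--     previous = [j * GAP_PENALTY for j in range(len(y) + 1)]
--
--     for i, x_char in enumerate(x, start=1):
--         current = [i * GAP_PENALTY] + [0] * len(y)
--         for j, y_char in enumerate(y, start=1):
--             match = previous[j - 1] + substitution_cost(x_char, y_char)
--             delete = previous[j] + GAP_PENALTY
--             insert = current[j - 1] + GAP_PENALTY
--             current[j] = min(match, delete, insert)
--         previous = current
--
--     return previous
-- ===== SOURCE B (Python) =====
-- GAP = 30
-- # 4x4 mismatch table in ACGT order, flattened row-major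
-- COSTS = [0, 110, 48, 94,
--          110, 0, 118, 48,
--          48, 118, 0, 110,
--          94, 48, 110, 0]
--
--
-- def last_row_costs(x: str, y: str) -> list:
--     """Column-major DP: sweep one column per character of y, keeping the
--     previous full column (indexed by position in x); collect the bottom
--     cell of each column."""
--     col = [i * GAP for i in range(len(x) + 1)]
--     out = [col[-1]]
--     for j, yc in enumerate(y, start=1):
--         new = [j * GAP]
--         for i, xc in enumerate(x, start=1):
--             new.append(min(min(col[i - 1] + COSTS["ACGT".index(xc) * 4 + "ACGT".index(yc)],
--                                new[i - 1] + GAP),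
--                            col[i] + GAP))
--         out.append(new[-1])
--         col = new
--     return out
-- ===== Notes on version B (the rewrite author's own statement) =====
-- stated objective: alternative
-- what changed: Transposed the DP: B sweeps column-major (outer loop over y, inner over x), maintaining one full column indexed by positions of x and collecting the bottom cell of every column, instead of A's row-major sweep that keeps whole rows indexed by positions of y; the mismatch table is a flat 4x4 array indexed arithmetically instead of nested dicts.
import Mathlib
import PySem

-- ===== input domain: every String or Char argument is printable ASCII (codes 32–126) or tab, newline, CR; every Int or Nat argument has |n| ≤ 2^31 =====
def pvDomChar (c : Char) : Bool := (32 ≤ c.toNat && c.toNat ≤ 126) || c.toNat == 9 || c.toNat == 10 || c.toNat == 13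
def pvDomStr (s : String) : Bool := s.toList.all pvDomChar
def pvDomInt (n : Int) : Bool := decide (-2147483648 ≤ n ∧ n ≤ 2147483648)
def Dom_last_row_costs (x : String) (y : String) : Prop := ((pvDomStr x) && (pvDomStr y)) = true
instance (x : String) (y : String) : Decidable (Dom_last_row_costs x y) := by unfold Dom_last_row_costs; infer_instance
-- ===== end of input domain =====

-- B transposes the DP to a column-major sweep (outer loop over y, one column per
-- character, collecting the bottom cell) with a flat 4x4 cost array; alternative
-- decomposition, same asymptotic cost.

-- ===== PORT A =====
-- MISMATCH_COST[left][right]; exact on ACGT characters (all inputs admitted by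
-- Pre_); on other characters Python raises KeyError, excluded by Pre_.
def subA (l r : Char) : Int :=
  match l, r with
  | 'A','A' => 0   | 'A','C' => 110 | 'A','G' => 48  | 'A','T' => 94
  | 'C','A' => 110 | 'C','C' => 0   | 'C','G' => 118 | 'C','T' => 48
  | 'G','A' => 48  | 'G','C' => 118 | 'G','G' => 0   | 'G','T' => 110
  | 'T','A' => 94  | 'T','C' => 48  | 'T','G' => 110 | 'T','T' => 0
  | _, _ => 0

-- inner `for j, y_char in enumerate(y, start=1)` loop; all list indices are in
-- range by construction, so Nat getD/set are exact for Python's [] here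
def lrcInner (prev : List Int) (xc : Char) : List Char → Nat → List Int → List Int
  | [], _, current => current
  | yc :: rest, j, current =>
    let m := prev.getD (j - 1) 0 + subA xc yc
    let d := prev.getD j 0 + 30
    let ins := current.getD (j - 1) 0 + 30
    lrcInner prev xc rest (j + 1) (current.set j (min (min m d) ins))

-- outer `for i, x_char in enumerate(x, start=1)` loop
def lrcOuter (yl : List Char) : List Char → Nat → List Int → List Int
  | [], _, previous => previous
  | xc :: rest, i, previous =>
    let current := ((i : Int) * 30) :: List.replicate yl.length 0
    lrcOuter yl rest (i + 1) (lrcInner previous xc yl 1 current)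

def last_row_costs (x : String) (y : String) : List Int :=
  lrcOuter y.toList x.toList 1
    ((List.range (y.toList.length + 1)).map (fun j : Nat => (j : Int) * 30))

-- ===== PORT B =====
-- "ACGT".index(c); Python raises ValueError off ACGT, excluded by Pre_
def acgtIdx (c : Char) : Nat :=
  match c with | 'A' => 0 | 'C' => 1 | 'G' => 2 | 'T' => 3 | _ => 0

def costsB : List Int := [0,110,48,94,110,0,118,48,48,118,0,110,94,48,110,0]

def subB (l r : Char) : Int := costsB.getD (acgtIdx l * 4 + acgtIdx r) 0

-- inner `for i, xc in enumerate(x, start=1)` loop: extends the new column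
def colInner (col : List Int) (yc : Char) : List Char → Nat → List Int → List Int
  | [], _, nw => nw
  | xc :: rest, i, nw =>
    colInner col yc rest (i + 1)
      (nw ++ [min (min (col.getD (i - 1) 0 + subB xc yc) (nw.getD (i - 1) 0 + 30))
                  (col.getD i 0 + 30)])

-- outer `for j, yc in enumerate(y, start=1)` loop; new[-1] is getLastD (new is never empty)
def colOuter (xl : List Char) : List Char → Nat → List Int → List Int → List Int
  | [], _, _, out => out
  | yc :: rest, j, col, out =>
    let nw := colInner col yc xl 1 [((j : Int) * 30)]
    colOuter xl rest (j + 1) nw (out ++ [nw.getLastD 0])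

def last_row_costs_alt (x : String) (y : String) : List Int :=
  let col := (List.range (x.toList.length + 1)).map (fun i : Nat => (i : Int) * 30)
  colOuter x.toList y.toList 1 col [col.getLastD 0]

-- ===== PRECONDITION & SPEC =====
-- Pre_ excludes exactly the inputs on which A raises (KeyError in
-- substitution_cost): both strings nonempty with some character outside "ACGT";
-- B raises ValueError on those same inputs.
def Pre_last_row_costs (x : String) (y : String) : Prop :=
  x.toList = [] ∨ y.toList = [] ∨
    ((x.toList.all fun c => c == 'A' || c == 'C' || c == 'G' || c == 'T') = true ∧
     (y.toList.all fun c => c == 'A' || c == 'C' || c == 'G' || c == 'T') = true)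
instance (x : String) (y : String) : Decidable (Pre_last_row_costs x y) := by
  unfold Pre_last_row_costs; infer_instance

def pvWitness_last_row_costs : String × String := ("AGT", "GACA")

def Spec_last_row_costs (x : String) (y : String) (out : List Int) : Prop := out = last_row_costs_alt x y
instance (x : String) (y : String) (out : List Int) : Decidable (Spec_last_row_costs x y out) := by unfold Spec_last_row_costs; infer_instance

-- ===== CLAIM (what is proved, stated in full; the proofs are below) =====
def Claim_equal_last_row_costs : Prop := ∀ (x : String) (y : String), Dom_last_row_costs x y → Pre_last_row_costs x y → Spec_last_row_costs x y (last_row_costs x y)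

-- ===== LEMMAS AND PROOFS =====


lemma drop_cons_getElem {α} (l : List α) (t : Nat) (a : α) (rest : List α)
    (h : l.drop t = a :: rest) : l[t]? = some a := by
  have h2 : (l.drop t)[0]? = l[t + 0]? := List.getElem?_drop
  simp [h] at h2; exact h2.symm

lemma drop_cons_lt {α} (l : List α) (t : Nat) (a : α) (rest : List α)
    (h : l.drop t = a :: rest) : t < l.length := by
  by_contra hc
  rw [List.drop_eq_nil_of_le (by omega)] at h; simp at h

lemma drop_cons_rest {α} (l : List α) (t : Nat) (a : α) (rest : List α)
    (h : l.drop t = a :: rest) : rest = l.drop (t + 1) := by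
  rw [← List.drop_drop, h]; rfl

lemma getLastD_eq_getD (l : List Int) : l.getLastD 0 = l.getD (l.length - 1) 0 := by
  rw [List.getLastD_eq_getLast?, List.getLast?_eq_getElem?, List.getD_eq_getElem?_getD]

lemma eq_range_map (l : List Int) (f : Nat → Int) (n : Nat) (hl : l.length = n + 1)
    (h : ∀ k ≤ n, l.getD k 0 = f k) : l = (List.range (n + 1)).map f := by
  apply List.ext_getElem (by simp [hl])
  intro k h1 h2
  have h3 := h k (by simp at h2; omega)
  rw [List.getD_eq_getElem _ _ (by omega)] at h3
  simpa using h3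

-- the alignment DP, parametric in the substitution-cost function
def dp (sub : Char → Char → Int) (xl yl : List Char) : Nat → Nat → Int
  | 0, j => (j : Int) * 30
  | i + 1, 0 => ((i : Int) + 1) * 30
  | i + 1, j + 1 =>
    min (min (dp sub xl yl i j + sub (xl.getD i 'A') (yl.getD j 'A'))
             (dp sub xl yl i (j + 1) + 30))
        (dp sub xl yl (i + 1) j + 30)
  termination_by i j => (i, j)

lemma dp_zero_left (sub : Char → Char → Int) (xl yl : List Char) (j : Nat) :
    dp sub xl yl 0 j = (j : Int) * 30 := by
  simp [dp]

lemma dp_zero_right (sub : Char → Char → Int) (xl yl : List Char) (i : Nat) :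
    dp sub xl yl i 0 = (i : Int) * 30 := by
  cases i <;> simp [dp]

lemma sub_eq (c d : Char) (hc : c ∈ ['A','C','G','T']) (hd : d ∈ ['A','C','G','T']) :
    subA c d = subB c d := by
  fin_cases hc <;> fin_cases hd <;> rfl

lemma dp_congr (sub1 sub2 : Char → Char → Int) (xl yl : List Char)
    (h : ∀ i < xl.length, ∀ j < yl.length,
      sub1 (xl.getD i 'A') (yl.getD j 'A') = sub2 (xl.getD i 'A') (yl.getD j 'A')) :
    ∀ i ≤ xl.length, ∀ j ≤ yl.length, dp sub1 xl yl i j = dp sub2 xl yl i j := by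
  intro i
  induction i with
  | zero => intro _ j _; simp [dp]
  | succ i ih =>
    intro hi j
    induction j with
    | zero => intro _; simp [dp]
    | succ j ihj =>
      intro hj
      rw [dp, dp, ih (by omega) j (by omega), ih (by omega) (j + 1) (by omega),
        ihj (by omega), h i (by omega) j (by omega)]

lemma inner_invariant (xl yl : List Char) (i : Nat) (prev : List Int)
    (hp : ∀ k ≤ yl.length, prev.getD k 0 = dp subA xl yl i k) :
    ∀ (ys : List Char) (t : Nat) (current : List Int),
      ys = yl.drop t → t ≤ yl.length →
      current.length = yl.length + 1 →
      (∀ k ≤ t, current.getD k 0 = dp subA xl yl (i + 1) k) →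
      (lrcInner prev (xl.getD i 'A') ys (t + 1) current).length = yl.length + 1 ∧
      ∀ k ≤ yl.length,
        (lrcInner prev (xl.getD i 'A') ys (t + 1) current).getD k 0 = dp subA xl yl (i + 1) k := by
  intro ys
  induction ys with
  | nil =>
    intro t current hdrop ht hlen hcur
    have ht' : t = yl.length := by
      have := List.drop_eq_nil_iff.mp hdrop.symm; omega
    subst ht'
    exact ⟨hlen, fun k hk => hcur k hk⟩
  | cons yc rest ih =>
    intro t current hdrop ht hlen hcur
    have hyc : yl[t]? = some yc := drop_cons_getElem _ _ _ _ hdrop.symm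
    have hlt : t < yl.length := drop_cons_lt _ _ _ _ hdrop.symm
    have hycD : yl.getD t 'A' = yc := by
      rw [List.getD_eq_getElem?_getD, hyc]; rfl
    have hv : min (min (prev.getD (t + 1 - 1) 0 + subA (xl.getD i 'A') yc)
          (prev.getD (t + 1) 0 + 30)) (current.getD (t + 1 - 1) 0 + 30)
        = dp subA xl yl (i + 1) (t + 1) := by
      simp only [Nat.add_sub_cancel]
      rw [hp t (by omega), hp (t + 1) (by omega), hcur t (le_refl t), ← hycD, dp]
    simp only [lrcInner]
    refine ih (t + 1) _ (drop_cons_rest _ _ _ _ hdrop.symm) (by omega)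
      (by simpa using hlen) ?_
    intro k hk
    rcases Nat.lt_or_ge k (t + 1) with hk2 | hk2
    · rw [List.getD_eq_getElem?_getD, List.getElem?_set, if_neg (by omega),
        ← List.getD_eq_getElem?_getD]
      exact hcur k (by omega)
    · have hk3 : k = t + 1 := by omega
      subst hk3
      rw [List.getD_eq_getElem?_getD, List.getElem?_set, if_pos rfl,
        if_pos (by omega), Option.getD_some, hv]

lemma outer_invariant (xl yl : List Char) :
    ∀ (xs : List Char) (t : Nat) (prev : List Int),
      xs = xl.drop t → t ≤ xl.length →
      prev.length = yl.length + 1 →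
      (∀ k ≤ yl.length, prev.getD k 0 = dp subA xl yl t k) →
      (lrcOuter yl xs (t + 1) prev).length = yl.length + 1 ∧
      ∀ k ≤ yl.length,
        (lrcOuter yl xs (t + 1) prev).getD k 0 = dp subA xl yl xl.length k := by
  intro xs
  induction xs with
  | nil =>
    intro t prev hdrop ht hlen hp
    have ht' : t = xl.length := by
      have := List.drop_eq_nil_iff.mp hdrop.symm; omega
    subst ht'
    exact ⟨hlen, fun k hk => hp k hk⟩
  | cons xc rest ih =>
    intro t prev hdrop ht hlen hp
    have hlt : t < xl.length := drop_cons_lt _ _ _ _ hdrop.symm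
    have hxc : xl.getD t 'A' = xc := by
      rw [List.getD_eq_getElem?_getD, drop_cons_getElem _ _ _ _ hdrop.symm]; rfl
    simp only [lrcOuter]
    have hinner := inner_invariant xl yl t prev hp yl 0
      (((t + 1 : Nat) : Int) * 30 :: List.replicate yl.length 0) rfl (by omega)
      (by simp) ?_
    · rw [← hxc]
      exact ih (t + 1) _ (drop_cons_rest _ _ _ _ hdrop.symm) (by omega)
        hinner.1 hinner.2
    · intro k hk
      have hk0 : k = 0 := by omega
      subst hk0
      simp only [List.getD_eq_getElem?_getD, List.getElem?_cons_zero, Option.getD_some]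
      rw [dp_zero_right]

lemma A_eq (x y : String) :
    last_row_costs x y =
      (List.range (y.toList.length + 1)).map
        (fun j => dp subA x.toList y.toList x.toList.length j) := by
  unfold last_row_costs
  have h := outer_invariant x.toList y.toList x.toList 0
    ((List.range (y.toList.length + 1)).map (fun j : Nat => (j : Int) * 30)) rfl (by omega)
    (by simp) ?_
  · exact eq_range_map _ _ _ h.1 h.2
  · intro k hk
    rw [List.getD_eq_getElem _ _ (by rw [List.length_map, List.length_range]; omega)]
    simp only [List.getElem_map, List.getElem_range]
    rw [dp_zero_left]

lemma col_inner_invariant (xl yl : List Char) (j : Nat) (col : List Int)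
    (hc : ∀ k ≤ xl.length, col.getD k 0 = dp subB xl yl k j) :
    ∀ (xs : List Char) (t : Nat) (nw : List Int),
      xs = xl.drop t → t ≤ xl.length →
      nw.length = t + 1 →
      (∀ k ≤ t, nw.getD k 0 = dp subB xl yl k (j + 1)) →
      (colInner col (yl.getD j 'A') xs (t + 1) nw).length = xl.length + 1 ∧
      ∀ k ≤ xl.length,
        (colInner col (yl.getD j 'A') xs (t + 1) nw).getD k 0 = dp subB xl yl k (j + 1) := by
  intro xs
  induction xs with
  | nil =>
    intro t nw hdrop ht hlen hnw
    have ht' : t = xl.length := by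
      have := List.drop_eq_nil_iff.mp hdrop.symm; omega
    subst ht'
    exact ⟨hlen, fun k hk => hnw k hk⟩
  | cons xc rest ih =>
    intro t nw hdrop ht hlen hnw
    have hlt : t < xl.length := drop_cons_lt _ _ _ _ hdrop.symm
    have hxc : xl.getD t 'A' = xc := by
      rw [List.getD_eq_getElem?_getD, drop_cons_getElem _ _ _ _ hdrop.symm]; rfl
    have hv : min (min (col.getD (t + 1 - 1) 0 + subB xc (yl.getD j 'A'))
          (nw.getD (t + 1 - 1) 0 + 30)) (col.getD (t + 1) 0 + 30)
        = dp subB xl yl (t + 1) (j + 1) := by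
      simp only [Nat.add_sub_cancel]
      rw [hc t (by omega), hc (t + 1) (by omega), hnw t (le_refl t), ← hxc, dp,
        min_right_comm]
    simp only [colInner]
    refine ih (t + 1) _ (drop_cons_rest _ _ _ _ hdrop.symm) (by omega)
      (by simp [hlen]) ?_
    intro k hk
    rcases Nat.lt_or_ge k (t + 1) with hk2 | hk2
    · rw [List.getD_eq_getElem?_getD, List.getElem?_append_left (by omega),
        ← List.getD_eq_getElem?_getD]
      exact hnw k (by omega)
    · have hk3 : k = t + 1 := by omega
      subst hk3
      rw [List.getD_eq_getElem?_getD]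
      have happ : (nw ++ [min (min (col.getD (t + 1 - 1) 0 + subB xc (yl.getD j 'A'))
            (nw.getD (t + 1 - 1) 0 + 30)) (col.getD (t + 1) 0 + 30)])[t + 1]?
          = some (min (min (col.getD (t + 1 - 1) 0 + subB xc (yl.getD j 'A'))
            (nw.getD (t + 1 - 1) 0 + 30)) (col.getD (t + 1) 0 + 30)) := by
        rw [← hlen]; simp
      rw [happ, Option.getD_some, hv]

lemma col_outer_invariant (xl yl : List Char) :
    ∀ (ys : List Char) (t : Nat) (col out : List Int),
      ys = yl.drop t → t ≤ yl.length →
      col.length = xl.length + 1 →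
      (∀ k ≤ xl.length, col.getD k 0 = dp subB xl yl k t) →
      out = (List.range (t + 1)).map (fun j => dp subB xl yl xl.length j) →
      colOuter xl ys (t + 1) col out =
        (List.range (yl.length + 1)).map (fun j => dp subB xl yl xl.length j) := by
  intro ys
  induction ys with
  | nil =>
    intro t col out hdrop ht hclen hcol hout
    have ht' : t = yl.length := by
      have := List.drop_eq_nil_iff.mp hdrop.symm; omega
    subst ht'
    simpa [colOuter] using hout
  | cons yc rest ih =>
    intro t col out hdrop ht hclen hcol hout
    have hlt : t < yl.length := drop_cons_lt _ _ _ _ hdrop.symm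
    have hyc : yl.getD t 'A' = yc := by
      rw [List.getD_eq_getElem?_getD, drop_cons_getElem _ _ _ _ hdrop.symm]; rfl
    simp only [colOuter]
    have hinner := col_inner_invariant xl yl t col hcol xl 0
      [((t + 1 : Nat) : Int) * 30] rfl (by omega) (by simp) ?_
    · rw [← hyc]
      refine ih (t + 1) _ _ (drop_cons_rest _ _ _ _ hdrop.symm) (by omega)
        hinner.1 hinner.2 ?_
      rw [hout, getLastD_eq_getD, hinner.1]
      simp only [Nat.add_sub_cancel]
      rw [hinner.2 xl.length (le_refl _),
        show List.range (t + 1 + 1) = List.range (t + 1) ++ [t + 1] from List.range_succ,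
        List.map_append]
      rfl
    · intro k hk
      have hk0 : k = 0 := by omega
      subst hk0
      simp only [List.getD_eq_getElem?_getD, List.getElem?_cons_zero, Option.getD_some]
      rw [dp_zero_left]

lemma B_eq (x y : String) :
    last_row_costs_alt x y =
      (List.range (y.toList.length + 1)).map
        (fun j => dp subB x.toList y.toList x.toList.length j) := by
  unfold last_row_costs_alt
  refine col_outer_invariant x.toList y.toList y.toList 0 _ _ rfl (by omega)
    (by simp) ?_ ?_
  · intro k hk
    rw [List.getD_eq_getElem _ _ (by rw [List.length_map, List.length_range]; omega)]
    simp only [List.getElem_map, List.getElem_range]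
    rw [dp_zero_right]
  · rw [getLastD_eq_getD]
    simp only [List.length_map, List.length_range, Nat.add_sub_cancel]
    rw [List.getD_eq_getElem _ _ (by rw [List.length_map, List.length_range]; omega)]
    norm_num [List.range_one, dp_zero_right]

-- ===== VERDICT (by name: the statement is the Claim_ definition above) =====
theorem last_row_costs_spec : Claim_equal_last_row_costs := by
  intro x y _ hpre
  unfold Spec_last_row_costs
  rw [A_eq, B_eq]
  apply List.map_congr_left
  intro j hj
  rw [List.mem_range] at hj
  apply dp_congr
  · intro a ha b hb
    rcases hpre with h | h | ⟨hx, hy⟩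
    · simp [h] at ha
    · simp [h] at hb
    · rw [List.getD_eq_getElem _ _ ha, List.getD_eq_getElem _ _ hb]
      have h1 := List.all_eq_true.mp hx _ (List.getElem_mem ha)
      have h2 := List.all_eq_true.mp hy _ (List.getElem_mem hb)
      refine sub_eq _ _ ?_ ?_ <;> simp at h1 h2 ⊢ <;> tauto
  · exact le_refl _
  · omega
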